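-- pv_equiv track=rewrite | github.com/wojcikiewicz17/Vectras-VM-Android | tools/state_geometry_lab/py/state_geometry_lab.py | prime_fibonacci_graph
-- ===== SOURCE A (Python) =====
-- from typing import Dict, List, Optional, Sequence, Tuple
--
-- def is_prime(n: int) -> bool:
--     if n < 2:
--         return False
--     if n % 2 == 0:
--         return n == 2
--     d = 3
--     while d * d <= n:
--         if n % d == 0:
--             return False
--         d += 2
--     return True
--
-- def prime_fibonacci_graph(n: int) -> Dict[int, List[int]]:
--     fib = [0, 1]
--     while len(fib) < n:
--         fib.append(fib[-1] + fib[-2])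
--     prime_idx = [i for i, v in enumerate(fib) if is_prime(v)]
--     graph = {i: [] for i in prime_idx}
--     for a, b in zip(prime_idx, prime_idx[1:]):
--         graph[a].append(b)
--     return graph
-- ===== SOURCE B (Python) =====
-- def _is_prime(n: int) -> bool:
--     if n < 2:
--         return False
--     if n % 2 == 0:
--         return n == 2
--     d = 3
--     while d * d <= n:
--         if n % d == 0:
--             return False
--         d += 2
--     return True
--
-- def prime_fibonacci_graph(n: int):
--     # Single fused pass: generate Fibonacci values with a rolling pair and emit
--     # each chain edge as soon as the next prime index is found; no fib list,
--     # no index list, no dict mutation passes.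
--     items = []
--     prev = None
--     a, b = 0, 1
--     i = 0
--     while i < n:
--         if _is_prime(a):
--             if prev is not None:
--                 items.append((prev, [i]))
--             prev = i
--         a, b = b, a + b
--         i += 1
--     if prev is not None:
--         items.append((prev, []))
--     return dict(items)
-- ===== Notes on version B (the rewrite author's own statement) =====
-- stated objective: simpler
-- what changed: B fuses A's four passes (materialized fib list, enumerate+filter, dict-of-empty-lists init, zip-then-append mutation) into a single rolling-pair loop that emits each chain edge as soon as the next prime Fibonacci index is found; the trial-division primality helper is shared unchanged.
import Mathlib
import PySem

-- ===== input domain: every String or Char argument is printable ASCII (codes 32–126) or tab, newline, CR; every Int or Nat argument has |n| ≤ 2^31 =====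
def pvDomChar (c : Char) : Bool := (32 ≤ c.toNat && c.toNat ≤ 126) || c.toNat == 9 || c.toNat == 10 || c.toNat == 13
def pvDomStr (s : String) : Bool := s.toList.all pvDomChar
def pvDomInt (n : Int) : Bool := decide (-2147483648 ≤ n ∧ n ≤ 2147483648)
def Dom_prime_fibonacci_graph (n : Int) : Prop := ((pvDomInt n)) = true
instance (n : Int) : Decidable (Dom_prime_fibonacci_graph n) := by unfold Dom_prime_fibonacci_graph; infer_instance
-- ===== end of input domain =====

-- B fuses A's four passes (fib list, enumerate+filter, dict init, zip/append) into one
-- rolling-pair loop that emits each chain edge as soon as the next prime index appears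
-- (objective: simpler; the shared trial-division primality helper is identical in both).

-- ===== PORT A =====
-- is_prime: helper shared verbatim by A and B (identical code in Source A and Source B).
def isPrimeLoop (n d : Int) : Bool :=
  if h : d * d ≤ n then
    if PySem.Int.mod n d == 0 then false else isPrimeLoop n (d + 2)
  else true
  termination_by (n + 2 - d).toNat
  decreasing_by
    have h1 : d ≤ n + 1 := by nlinarith [mul_self_nonneg (d - 1)]
    omega

def isPrime (n : Int) : Bool :=
  if n < 2 then false
  else if PySem.Int.mod n 2 == 0 then n == 2
  else isPrimeLoop n 3

-- while len(fib) < n: fib.append(fib[-1] + fib[-2]); fib always has ≥ 2 elements at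
-- every call site, so fib[-1]/fib[-2] exist and the `.getD 0` default is unreachable.
def fibExtend (n : Int) (fib : List Int) : List Int :=
  if h : (fib.length : Int) < n then
    fibExtend n (fib ++ [(PySem.List.pyGet? fib (-1)).getD 0 + (PySem.List.pyGet? fib (-2)).getD 0])
  else fib
  termination_by (n - fib.length).toNat
  decreasing_by simp only [List.length_append, List.length_cons, List.length_nil]; omega

def prime_fibonacci_graph (n : Int) : List (Int × List Int) :=
  let fib := fibExtend n [0, 1]
  let prime_idx := ((PySem.List.enumerate fib 0).filter (fun p => isPrime p.2)).map (fun p => p.1)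
  let g := prime_idx.foldl (fun d i => PySem.Dict.insert d i ([] : List Int)) PySem.Dict.empty
  -- graph[a].append(b): key a is always present, so `modify` with default [] is exact.
  let g2 := (prime_idx.zip (PySem.List.slice prime_idx (some 1) none)).foldl
      (fun d ab => PySem.Dict.modify d ab.1 [] (fun l => l ++ [ab.2])) g
  g2.items

-- ===== PORT B =====
def altLoop (n : Int) (items : List (Int × List Int)) (prev : Option Int) (a b i : Int) :
    List (Int × List Int) × Option Int :=
  if h : i < n then
    if isPrime a then
      altLoop n (match prev with | some p => items ++ [(p, [i])] | none => items)
        (some i) b (a + b) (i + 1)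
    else
      altLoop n items prev b (a + b) (i + 1)
  else (items, prev)
  termination_by (n - i).toNat
  decreasing_by all_goals omega

def prime_fibonacci_graph_alt (n : Int) : List (Int × List Int) :=
  let r := altLoop n [] none 0 1 0
  let items := match r.2 with
    | some p => r.1 ++ [(p, [])]
    | none => r.1
  (PySem.Dict.ofList items).items   -- return dict(items)

-- ===== PRECONDITION & SPEC =====
def Spec_prime_fibonacci_graph (n : Int) (out : List (Int × List Int)) : Prop := out = prime_fibonacci_graph_alt n
instance (n : Int) (out : List (Int × List Int)) : Decidable (Spec_prime_fibonacci_graph n out) := by unfold Spec_prime_fibonacci_graph; infer_instance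

-- ===== CLAIM (what is proved, stated in full; the proofs are below) =====
def Claim_equal_prime_fibonacci_graph : Prop := ∀ (n : Int), Dom_prime_fibonacci_graph n → Spec_prime_fibonacci_graph n (prime_fibonacci_graph n)

-- ===== LEMMAS AND PROOFS =====

-- Fibonacci by rolling pair, and the chain-of-prime-indices shape both programs build.
def fibP : Nat → Int × Int
  | 0 => (0, 1)
  | k + 1 => ((fibP k).2, (fibP k).1 + (fibP k).2)

def fibF (k : Nat) : Int := (fibP k).1

def chain : List Int → List (Int × List Int)
  | [] => []
  | [x] => [(x, [])]
  | x :: y :: r => (x, [y]) :: chain (y :: r)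

def psN (L : Nat) : List Nat := (List.range L).filter (fun k => isPrime (fibF k))

lemma fibF_add_two (k : Nat) : fibF (k + 2) = fibF k + fibF (k + 1) := by
  simp [fibF, fibP]

lemma fibExtend_spec (n : Int) (m : Nat) (hm : 2 ≤ m) :
    fibExtend n ((List.range m).map fibF) = (List.range (max m n.toNat)).map fibF := by
  have hlen : ((List.range m).map fibF).length = m := by simp
  have hget : ∀ j : Nat, 1 ≤ j → j ≤ m →
      PySem.List.pyGet? ((List.range m).map fibF) (-(j : Int)) = some (fibF (m - j)) := by
    intro j hj1 hjm
    unfold PySem.List.pyGet? PySem.List.pyIdx?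
    rw [hlen]
    have h0 : ¬ (0 ≤ -(j : Int)) := by omega
    have h1 : -(m : Int) ≤ -(j : Int) := by omega
    rw [if_neg h0, if_pos h1]
    have h2 : (-(-(j : Int))).toNat = j := by simp
    rw [h2]
    simp [Option.bind]
    exact ⟨m - j, by rw [List.getElem?_range (by omega)], rfl⟩
  rw [fibExtend]
  by_cases h : ((((List.range m).map fibF).length : Int) < n)
  · rw [dif_pos h]
    rw [hlen] at h
    have hg1 := hget 1 (by omega) (by omega)
    have hg2 := hget 2 (by omega) (by omega)
    norm_num at hg1 hg2
    rw [hg1, hg2]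
    simp only [Option.getD_some]
    have hadd : fibF (m - 1) + fibF (m - 2) = fibF m := by
      have := fibF_add_two (m - 2)
      have e1 : m - 2 + 2 = m := by omega
      have e2 : m - 2 + 1 = m - 1 := by omega
      rw [e1, e2] at this
      omega
    rw [hadd]
    have hr : (List.range m).map fibF ++ [fibF m] = (List.range (m + 1)).map fibF := by
      rw [List.range_succ, List.map_append]; rfl
    rw [hr, fibExtend_spec n (m + 1) (by omega)]
    have : max (m + 1) n.toNat = max m n.toNat := by omega
    rw [this]
  · rw [dif_neg h]
    rw [hlen] at h
    have : max m n.toNat = m := by omega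
    rw [this]
  termination_by (n - m).toNat
  decreasing_by omega

lemma prime_idx_spec (L : Nat) :
    ((PySem.List.enumerate ((List.range L).map fibF) 0).filter (fun p => isPrime p.2)).map (fun p => p.1)
      = (psN L).map (fun k => Int.ofNat k) := by
  induction L with
  | zero => simp [psN]
  | succ L ih =>
    rw [List.range_succ, List.map_append, PySem.List.enumerate_append, List.filter_append,
      List.map_append, ih]
    unfold psN
    rw [List.range_succ, List.filter_append]
    simp only [List.map_append]
    congr 1
    by_cases hp : isPrime (fibF L) <;>
      simp [PySem.List.enumerate_cons, PySem.List.enumerate_nil, hp]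

lemma insertFold_items {ν : Type} (l : List (Int × ν)) (d : PySem.Dict Int ν)
    (hnd : (l.map (fun p => p.1)).Nodup) (hd : ∀ p ∈ l, d.contains p.1 = false) :
    (l.foldl (fun acc p => acc.insert p.1 p.2) d).items = d.items ++ l := by
  induction l generalizing d with
  | nil => simp
  | cons p t ih =>
    simp only [List.map_cons, List.nodup_cons] at hnd
    have hc : d.contains p.1 = false := hd p (by simp)
    have ht : ∀ q ∈ t, (d.insert p.1 p.2).contains q.1 = false := by
      intro q hq
      rw [PySem.Dict.contains_insert]
      have h1 : q.1 ≠ p.1 := fun he => hnd.1 (he ▸ List.mem_map_of_mem hq)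
      simp [h1, hd q (by simp [hq])]
    simp only [List.foldl_cons]
    rw [ih (d.insert p.1 p.2) hnd.2 ht, PySem.Dict.items_insert_of_not_contains d p.2 hc]
    simp

lemma modify_head (x : Int) (v0 : List Int) (l : List (Int × List Int))
    (f : List Int → List Int) (hx : ∀ q ∈ l, q.1 ≠ x) :
    (PySem.Dict.mk ((x, v0) :: l)).modify x [] f = PySem.Dict.mk ((x, f v0) :: l) := by
  unfold PySem.Dict.modify PySem.Dict.insert PySem.Dict.getD PySem.Dict.get? PySem.Dict.contains PySem.Dict.items
  simp
  induction l with
  | nil => rfl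
  | cons q t ih =>
    simp only [List.map_cons]
    rw [if_neg (by simpa using hx q (by simp)), ih (fun r hr => hx r (by simp [hr]))]

lemma modify_cons (p : Int × List Int) (d : PySem.Dict Int (List Int)) (k : Int)
    (f : List Int → List Int) (hne : p.1 ≠ k) :
    (PySem.Dict.mk (p :: d.items)).modify k [] f = PySem.Dict.mk (p :: (d.modify k [] f).items) := by
  unfold PySem.Dict.modify PySem.Dict.insert PySem.Dict.getD PySem.Dict.get? PySem.Dict.contains PySem.Dict.items
  have hb : (p.1 == k) = false := by simpa using hne
  by_cases hc : (d.1.any fun p => p.1 == k) = true <;> simp [hne, hb, hc]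

lemma modFold_cons (q : List (Int × Int)) (p : Int × List Int) (d : PySem.Dict Int (List Int))
    (h : ∀ ab ∈ q, ab.1 ≠ p.1) :
    (q.foldl (fun d ab => d.modify ab.1 [] (fun l => l ++ [ab.2])) (PySem.Dict.mk (p :: d.items))).items
      = p :: (q.foldl (fun d ab => d.modify ab.1 [] (fun l => l ++ [ab.2])) d).items := by
  induction q generalizing d with
  | nil => simp
  | cons ab t ih =>
    simp only [List.foldl_cons]
    rw [modify_cons p d ab.1 (fun l => l ++ [ab.2]) ((h ab (by simp)).symm)]
    exact ih (d.modify ab.1 [] fun l => l ++ [ab.2]) (fun q hq => h q (by simp [hq]))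

lemma pipeline_items (ps : List Int) (hnd : ps.Nodup) :
    ((ps.zip ps.tail).foldl (fun d ab => d.modify ab.1 [] (fun l => l ++ [ab.2]))
      (PySem.Dict.mk (ps.map (fun i => (i, ([] : List Int)))))).items = chain ps := by
  induction ps using chain.induct with
  | case1 => rfl
  | case2 x => rfl
  | case3 x y r ih =>
    have hnd' : (y :: r).Nodup := hnd.of_cons
    have hx : x ∉ y :: r := by
      intro hmem; exact (List.nodup_cons.mp hnd).1 hmem
    simp only [List.tail_cons, List.zip_cons_cons, List.map_cons, List.foldl_cons]
    rw [modify_head x [] ((y, ([] : List Int)) :: r.map (fun i => (i, ([] : List Int)))) (fun l => l ++ [y])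
      (by
        intro q hq
        rcases List.mem_cons.mp hq with h1 | h1
        · subst h1; exact fun he => hx (he ▸ List.mem_cons_self ..)
        · obtain ⟨i, hi, rfl⟩ := List.mem_map.mp h1
          exact fun he => hx (he ▸ List.mem_cons_of_mem _ hi))]
    have hmf := modFold_cons ((y :: r).zip r) (x, [y])
      (PySem.Dict.mk ((y, ([] : List Int)) :: r.map (fun i => (i, ([] : List Int)))))
      (by
        intro ab hab he
        apply hx
        have hm := (List.of_mem_zip hab).1
        rw [he] at hm
        simpa using hm)
    dsimp only at hmf
    simp only [List.nil_append]
    simp only [List.map_cons, List.tail_cons] at ih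
    rw [hmf, ih hnd']
    rfl

lemma chain_map_fst (ps : List Int) : (chain ps).map (fun p => p.1) = ps := by
  induction ps with
  | nil => rfl
  | cons x t ih =>
    cases t with
    | nil => rfl
    | cons y r => simpa [chain] using ih

def accB : List (Int × List Int) → Option Int → List Nat → List (Int × List Int) × Option Int
  | items, prev, [] => (items, prev)
  | items, prev, k :: ks =>
      accB (match prev with | some p => items ++ [(p, [Int.ofNat k])] | none => items) (some (Int.ofNat k)) ks

def wrapB (r : List (Int × List Int) × Option Int) : List (Int × List Int) :=
  match r.2 with
  | some p => r.1 ++ [(p, [])]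
  | none => r.1

lemma altLoop_spec (n : Int) (j : Nat) (items : List (Int × List Int)) (prev : Option Int) :
    altLoop n items prev (fibF j) (fibF (j + 1)) (j : Int)
      = accB items prev ((List.range' j (n.toNat - j)).filter (fun k => isPrime (fibF k))) := by
  rw [altLoop.eq_def]
  by_cases h : (j : Int) < n
  · rw [dif_pos h]
    have hcnt : n.toNat - j = (n.toNat - (j + 1)) + 1 := by omega
    rw [hcnt, List.range'_succ, List.filter_cons]
    have hstep : fibF j + fibF (j + 1) = fibF (j + 2) := (fibF_add_two j).symm
    have hcast : (j : Int) + 1 = ((j + 1 : Nat) : Int) := by push_cast; ring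
    by_cases hp : isPrime (fibF j)
    · rw [if_pos hp, if_pos (by simpa using hp)]
      rw [hstep, hcast, altLoop_spec n (j + 1)]
      simp [accB, Int.ofNat_eq_natCast]
    · rw [if_neg (by simpa using hp), if_neg (by simpa using hp)]
      rw [hstep, hcast, altLoop_spec n (j + 1)]
  · rw [dif_neg h]
    have hz : n.toNat - j = 0 := by omega
    rw [hz]
    rfl
  termination_by (n - j).toNat
  decreasing_by all_goals omega

lemma wrap_accB (ks : List Nat) : ∀ (items : List (Int × List Int)) (prev : Option Int),
    wrapB (accB items prev ks)
      = items ++ (match prev with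
          | none => chain (ks.map (fun k => Int.ofNat k))
          | some p => chain (p :: ks.map (fun k => Int.ofNat k))) := by
  induction ks with
  | nil => intro items prev; cases prev <;> simp [accB, wrapB, chain]
  | cons k t ih =>
    intro items prev
    cases prev with
    | none => simpa [accB, chain] using ih items (some (Int.ofNat k))
    | some p =>
      have := ih (items ++ [(p, [Int.ofNat k])]) (some (Int.ofNat k))
      simp only [accB] at *
      rw [this, List.append_assoc]
      rfl

lemma psN_small (L : Nat) (h : L ≤ 2) : psN L = [] := by
  interval_cases L <;> simp [psN, List.range_succ, isPrime, fibF, fibP, PySem.Int.mod]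

lemma psN_nodup (L : Nat) : ((psN L).map (fun k => Int.ofNat k)).Nodup := by
  unfold psN
  exact ((List.nodup_range).filter _).map (fun a b h => by simpa using h)

-- ===== VERDICT (by name: the statement is the Claim_ definition above) =====
lemma dict_eta {ν : Type} (d : PySem.Dict Int ν) : d = PySem.Dict.mk d.items := rfl

lemma portA_chain (n : Int) :
    prime_fibonacci_graph n = chain ((psN (max 2 n.toNat)).map (fun k => Int.ofNat k)) := by
  unfold prime_fibonacci_graph
  dsimp only
  have hfib : fibExtend n [0, 1] = (List.range (max 2 n.toNat)).map fibF := by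
    have h01 : ([0, 1] : List Int) = (List.range 2).map fibF := rfl
    rw [h01, fibExtend_spec n 2 le_rfl]
  rw [hfib, prime_idx_spec]
  set ps := (psN (max 2 n.toNat)).map (fun k => Int.ofNat k) with hps
  have hnd : ps.Nodup := psN_nodup _
  have hins : ps.foldl (fun d i => PySem.Dict.insert d i ([] : List Int)) PySem.Dict.empty
      = PySem.Dict.mk (ps.map (fun i => (i, ([] : List Int)))) := by
    have hfm : (ps.map (fun i => (i, ([] : List Int)))).foldl
        (fun (acc : PySem.Dict Int (List Int)) (p : Int × List Int) => acc.insert p.1 p.2)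
        PySem.Dict.empty
        = ps.foldl (fun d i => PySem.Dict.insert d i ([] : List Int)) PySem.Dict.empty := by
      rw [List.foldl_map]
    rw [← hfm]
    rw [dict_eta (List.foldl _ _ _)]
    rw [insertFold_items _ PySem.Dict.empty (by
        simpa [List.map_map,
          show ((fun p : Int × List Int => p.1) ∘ fun i : Int => (i, ([] : List Int))) = id from rfl]
          using hnd)
      (by intro q hq; exact PySem.Dict.contains_empty _)]
    simp [PySem.Dict.empty]
  have hsl : PySem.List.slice ps (some 1) none = ps.tail := by
    rw [PySem.List.slice_from ps (by norm_num)]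
    simp [List.drop_one]
  rw [hins, hsl]
  exact pipeline_items ps hnd

lemma portB_chain (n : Int) :
    prime_fibonacci_graph_alt n = chain ((psN n.toNat).map (fun k => Int.ofNat k)) := by
  unfold prime_fibonacci_graph_alt
  dsimp only
  have hloop : altLoop n [] none 0 1 0
      = accB [] none ((List.range' 0 (n.toNat - 0)).filter (fun k => isPrime (fibF k))) :=
    altLoop_spec n 0 [] none
  have hks : (List.range' 0 (n.toNat - 0)).filter (fun k => isPrime (fibF k)) = psN n.toNat := by
    rw [Nat.sub_zero, ← List.range_eq_range']
    rfl
  rw [hks] at hloop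
  have hwrap : (match (altLoop n [] none 0 1 0).2 with
      | some p => (altLoop n [] none 0 1 0).1 ++ [(p, [])]
      | none => (altLoop n [] none 0 1 0).1) = wrapB (altLoop n [] none 0 1 0) := rfl
  rw [hwrap, hloop, wrap_accB (psN n.toNat) [] none]
  simp only [List.nil_append]
  set l := chain ((psN n.toNat).map (fun k => Int.ofNat k)) with hl
  have hndl : (l.map (fun p => p.1)).Nodup := by
    rw [hl, chain_map_fst]
    exact psN_nodup _
  unfold PySem.Dict.ofList PySem.Dict.update
  rw [dict_eta (List.foldl (fun (acc : PySem.Dict Int (List Int)) (p : Int × List Int) => acc.insert p.1 p.2) (PySem.Dict.empty : PySem.Dict Int (List Int)) l)]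
  rw [insertFold_items l (PySem.Dict.empty : PySem.Dict Int (List Int)) hndl (by intro q hq; exact PySem.Dict.contains_empty _)]
  simp [PySem.Dict.empty]

-- ===== final verdict proof =====
theorem prime_fibonacci_graph_spec : Claim_equal_prime_fibonacci_graph := by
  intro n _
  unfold Spec_prime_fibonacci_graph
  rw [portA_chain n, portB_chain n]
  by_cases h2 : 2 ≤ n.toNat
  · rw [max_eq_right h2]
  · have hm : max 2 n.toNat = 2 := by omega
    rw [hm, psN_small 2 le_rfl, psN_small n.toNat (by omega)]
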